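-- pv_equiv track=rewrite | github.com/bheemrc/jobflow-ai | apps/api/app/dna/expression.py | _pick_verify_agent
-- ===== SOURCE A (Python) =====
-- def _pick_verify_agent(requesting_agent: str, gene: dict) -> str:
--     """Pick the best agent to verify a hunch based on gene tags."""
--     tags = set(gene.get("tags", []))
--
--     # Simple mapping of topic areas to agents
--     agent_specialties = {
--         "market_intel": {"market", "trends", "hiring", "layoffs", "industry"},
--         "job_scout": {"jobs", "search", "backend", "frontend", "roles"},
--         "network_mapper": {"contacts", "networking", "linkedin", "people"},
--         "salary_tracker": {"salary", "compensation", "negotiation", "pay"},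
--         "interview_prep": {"interview", "prep", "questions", "behavioral"},
--     }
--
--     best_agent = "market_intel"  # Default fallback
--     best_overlap = 0
--
--     for agent_name, specialties in agent_specialties.items():
--         if agent_name == requesting_agent:
--             continue
--         overlap = len(tags & specialties)
--         if overlap > best_overlap:
--             best_overlap = overlap
--             best_agent = agent_name
--
--     return best_agent
-- ===== SOURCE B (Python) =====
-- _AGENTS = ["market_intel", "job_scout", "network_mapper", "salary_tracker", "interview_prep"]
--
-- # Reverse index: each specialty tag belongs to exactly one agent.
-- _TAG_OWNER = {
--     "market": "market_intel", "trends": "market_intel", "hiring": "market_intel",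
--     "layoffs": "market_intel", "industry": "market_intel",
--     "jobs": "job_scout", "search": "job_scout", "backend": "job_scout",
--     "frontend": "job_scout", "roles": "job_scout",
--     "contacts": "network_mapper", "networking": "network_mapper",
--     "linkedin": "network_mapper", "people": "network_mapper",
--     "salary": "salary_tracker", "compensation": "salary_tracker",
--     "negotiation": "salary_tracker", "pay": "salary_tracker",
--     "interview": "interview_prep", "prep": "interview_prep",
--     "questions": "interview_prep", "behavioral": "interview_prep",
-- }
--
--
-- def _pick_verify_agent(requesting_agent: str, gene: dict) -> str:
--     """Pick the best agent to verify a hunch based on gene tags."""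
--     # One pass over the gene's distinct tags, tallying per owning agent.
--     counts = dict.fromkeys(_AGENTS, 0)
--     for tag in set(gene.get("tags", [])):
--         owner = _TAG_OWNER.get(tag)
--         if owner is not None:
--             counts[owner] += 1
--
--     # First agent (in order) with a strictly better tally wins.
--     best_agent = "market_intel"
--     best_overlap = 0
--     for agent in _AGENTS:
--         if agent == requesting_agent:
--             continue
--         if counts[agent] > best_overlap:
--             best_overlap = counts[agent]
--             best_agent = agent
--     return best_agent
-- ===== Notes on version B (the rewrite author's own statement) =====
-- stated objective: alternative
-- what changed: Replaces A's per-agent set-intersection scan with a reverse index mapping every specialty tag to its unique owning agent (the specialty sets are disjoint) plus a single tallying pass over the gene's distinct tags; the ordered first-strictly-better selection loop is kept to reproduce default and tie-breaking exactly.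
import Mathlib
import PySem

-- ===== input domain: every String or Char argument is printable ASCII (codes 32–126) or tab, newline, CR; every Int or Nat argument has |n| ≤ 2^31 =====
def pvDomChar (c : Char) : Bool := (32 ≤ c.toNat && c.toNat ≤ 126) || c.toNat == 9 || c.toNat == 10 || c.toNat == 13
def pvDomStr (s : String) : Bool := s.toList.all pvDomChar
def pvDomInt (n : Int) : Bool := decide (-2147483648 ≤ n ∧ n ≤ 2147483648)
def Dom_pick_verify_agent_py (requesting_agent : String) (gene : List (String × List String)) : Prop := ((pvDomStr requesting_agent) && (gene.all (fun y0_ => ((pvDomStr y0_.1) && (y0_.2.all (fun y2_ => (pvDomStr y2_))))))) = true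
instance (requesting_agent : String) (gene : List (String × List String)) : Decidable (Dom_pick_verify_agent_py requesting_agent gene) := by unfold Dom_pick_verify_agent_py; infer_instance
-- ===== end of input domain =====

-- B replaces A's per-agent set-intersection scan by a reverse tag→agent index and a single
-- tallying pass over the gene's distinct tags (objective: alternative decomposition).

-- ===== PORT A =====
def pvSpecsA : List (String × List String) :=
  [("market_intel", ["market", "trends", "hiring", "layoffs", "industry"]),
   ("job_scout", ["jobs", "search", "backend", "frontend", "roles"]),
   ("network_mapper", ["contacts", "networking", "linkedin", "people"]),
   ("salary_tracker", ["salary", "compensation", "negotiation", "pay"]),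
   ("interview_prep", ["interview", "prep", "questions", "behavioral"])]

def pick_verify_agent_py (requesting_agent : String) (gene : List (String × List String)) : String :=
  let tags : PySem.Set String := PySem.Set.ofList (PySem.Dict.getD (PySem.Dict.ofList gene) "tags" [])
  (pvSpecsA.foldl
    (fun (st : String × Int) p =>
      if p.1 == requesting_agent then st
      else
        let overlap : Int := PySem.Set.len (PySem.Set.inter tags (PySem.Set.ofList p.2))
        if overlap > st.2 then (p.1, overlap) else st)
    ("market_intel", 0)).1

-- ===== PORT B =====
def pvAgents : List String :=
  ["market_intel", "job_scout", "network_mapper", "salary_tracker", "interview_prep"]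

-- Source B's _TAG_OWNER: reverse index, each specialty tag → its unique owning agent
def pvOwner : PySem.Dict String String :=
  PySem.Dict.ofList
    [("market", "market_intel"), ("trends", "market_intel"), ("hiring", "market_intel"),
     ("layoffs", "market_intel"), ("industry", "market_intel"),
     ("jobs", "job_scout"), ("search", "job_scout"), ("backend", "job_scout"),
     ("frontend", "job_scout"), ("roles", "job_scout"),
     ("contacts", "network_mapper"), ("networking", "network_mapper"),
     ("linkedin", "network_mapper"), ("people", "network_mapper"),
     ("salary", "salary_tracker"), ("compensation", "salary_tracker"),
     ("negotiation", "salary_tracker"), ("pay", "salary_tracker"),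
     ("interview", "interview_prep"), ("prep", "interview_prep"),
     ("questions", "interview_prep"), ("behavioral", "interview_prep")]

def pick_verify_agent_py_alt (requesting_agent : String) (gene : List (String × List String)) : String :=
  let counts0 : PySem.Dict String Int :=
    pvAgents.foldl (fun d a => PySem.Dict.insert d a 0) PySem.Dict.empty
  let counts : PySem.Dict String Int :=
    (PySem.Set.ofList (PySem.Dict.getD (PySem.Dict.ofList gene) "tags" [])).foldl
      (fun d t =>
        match PySem.Dict.get? pvOwner t with
        | some a => PySem.Dict.modify d a 0 (· + 1)
        | none => d)
      counts0
  (pvAgents.foldl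
    (fun (st : String × Int) a =>
      if a == requesting_agent then st
      else if PySem.Dict.getD counts a 0 > st.2 then (a, PySem.Dict.getD counts a 0)
      else st)
    ("market_intel", 0)).1

-- ===== PRECONDITION & SPEC =====
def Spec_pick_verify_agent_py (requesting_agent : String) (gene : List (String × List String)) (out : String) : Prop := out = pick_verify_agent_py_alt requesting_agent gene
instance (requesting_agent : String) (gene : List (String × List String)) (out : String) : Decidable (Spec_pick_verify_agent_py requesting_agent gene out) := by unfold Spec_pick_verify_agent_py; infer_instance

-- ===== CLAIM (what is proved, stated in full; the proofs are below) =====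
def Claim_equal_pick_verify_agent_py : Prop := ∀ (requesting_agent : String) (gene : List (String × List String)), Dom_pick_verify_agent_py requesting_agent gene → Spec_pick_verify_agent_py requesting_agent gene (pick_verify_agent_py requesting_agent gene)

-- ===== LEMMAS AND PROOFS =====

-- per-tag bridge: pvOwner maps t to agent a iff t lies in a's specialty list
theorem pvOwner_items : pvOwner.items =
    [("market", "market_intel"), ("trends", "market_intel"), ("hiring", "market_intel"),
     ("layoffs", "market_intel"), ("industry", "market_intel"),
     ("jobs", "job_scout"), ("search", "job_scout"), ("backend", "job_scout"),
     ("frontend", "job_scout"), ("roles", "job_scout"),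
     ("contacts", "network_mapper"), ("networking", "network_mapper"),
     ("linkedin", "network_mapper"), ("people", "network_mapper"),
     ("salary", "salary_tracker"), ("compensation", "salary_tracker"),
     ("negotiation", "salary_tracker"), ("pay", "salary_tracker"),
     ("interview", "interview_prep"), ("prep", "interview_prep"),
     ("questions", "interview_prep"), ("behavioral", "interview_prep")] := by decide

theorem pvOwner_iff (t a : String) (spec : List String)
    (h : (a, spec) ∈ pvSpecsA) :
    (PySem.Dict.get? pvOwner t = some a) ↔ t ∈ spec := by
  simp only [pvSpecsA, List.mem_cons, List.not_mem_nil, or_false, Prod.mk.injEq] at h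
  rcases h with ⟨h1, h2⟩ | ⟨h1, h2⟩ | ⟨h1, h2⟩ | ⟨h1, h2⟩ | ⟨h1, h2⟩ <;> subst h1 <;> subst h2 <;>
    simp [PySem.Dict.get?, pvOwner_items, List.find?] <;>
    aesop

-- tally invariant: folding the counter over ts adds countP to each stored agent tally
theorem counts_foldl (ts : List String) (d : PySem.Dict String Int) (a : String) :
    PySem.Dict.getD
      (ts.foldl (fun (d : PySem.Dict String Int) t =>
          match PySem.Dict.get? pvOwner t with
          | some b => PySem.Dict.modify d b 0 (· + 1)
          | none => d) d) a 0
      = PySem.Dict.getD d a 0 + (ts.countP (fun t => PySem.Dict.get? pvOwner t == some a) : Int) := by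
  induction ts generalizing d with
  | nil => simp
  | cons t ts ih =>
    simp only [List.foldl_cons, List.countP_cons]
    rw [ih]
    cases hg : PySem.Dict.get? pvOwner t with
    | none => simp
    | some b =>
      by_cases hb : a = b
      · subst hb
        simp
        ring
      · simp [PySem.Dict.getD_modify, hb, Ne.symm hb]

-- A's overlap is the same countP of the distinct-tag list
theorem overlap_eq (ts : PySem.Set String) (a : String) (spec : List String)
    (h : (a, spec) ∈ pvSpecsA) :
    (PySem.Set.len (PySem.Set.inter ts (PySem.Set.ofList spec)) : Int)
      = (ts.countP (fun t => PySem.Dict.get? pvOwner t == some a) : Int) := by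
  have hpt : ∀ x, (decide (x ∈ spec)) = (PySem.Dict.get? pvOwner x == some a) := by
    intro x
    rw [Bool.eq_iff_iff]
    simpa using (pvOwner_iff x a spec h).symm
  simp [PySem.Set.len, PySem.Set.inter, List.countP_eq_length_filter, hpt]

-- ===== VERDICT (by name: the statement is the Claim_ definition above) =====
theorem pick_verify_agent_py_spec : Claim_equal_pick_verify_agent_py := by
  intro r gene _
  show pick_verify_agent_py r gene = pick_verify_agent_py_alt r gene
  simp only [pick_verify_agent_py, pick_verify_agent_py_alt]
  set ts : PySem.Set String := PySem.Set.ofList (PySem.Dict.getD (PySem.Dict.ofList gene) "tags" []) with hts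
  set counts0 : PySem.Dict String Int :=
    pvAgents.foldl (fun d a => PySem.Dict.insert d a 0) PySem.Dict.empty with hc0
  set counts : PySem.Dict String Int := ts.foldl (fun d t => match PySem.Dict.get? pvOwner t with
        | some a => PySem.Dict.modify d a 0 (· + 1) | none => d) counts0 with hcounts
  have hBA : pvAgents = pvSpecsA.map Prod.fst := rfl
  rw [hBA, List.foldl_map]
  apply congrArg Prod.fst
  apply PySem.List.foldl_congr_mem
  intro st p hp
  have hkey : PySem.Dict.getD counts p.1 0
      = (PySem.Set.len (PySem.Set.inter ts (PySem.Set.ofList p.2)) : Int) := by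
    rw [hcounts, counts_foldl, overlap_eq ts p.1 p.2 (by simpa using hp)]
    have h0 : PySem.Dict.getD counts0 p.1 0 = 0 := by
      fin_cases hp <;> rw [hc0] <;> decide
    rw [h0, zero_add]
  rw [hkey]
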